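-- pv_equiv track=rewrite | github.com/rjovelin/HumanNestedGenes | HsaNestedGenes.py | RemoveGenePairsFromHigherLevel
-- ===== SOURCE A (Python) =====
-- def RemoveGenePairsFromHigherLevel(HigherLevelPairs, LowerLevelPairs):
--     '''
--     (list, list) -> dict
--     Take the list of gene pairs from a higher inclusive level (ie. overlapping,
--     contained) and remove the gene pairs from the lower lovel (contained,
--     intronic nested) to generate pairs of genes that do not overlapp and that
--     correspond to a unique gene organization
--     Precondition: first gene in pair is the first gene on chromo
--     '''
--
--     # create a list of gene pairs to remove
--     to_remove = []
--     # loop over gene pairs from lower hierarchical level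
--     for i in range(len(LowerLevelPairs)):
--         # loop over gene pairs from higher hierarchical level
--         for j in range(len(HigherLevelPairs)):
--             # compare the 2 gene pairs, ignore gene order
--             if set(LowerLevelPairs[i]) == set(HigherLevelPairs[j]):
--                 # remove pair from higher hierarchical level
--                 to_remove.append(HigherLevelPairs[j])
--     # remove gene pairs from higher hierarchical level
--     for pair in to_remove:
--         HigherLevelPairs.remove(pair)
--     return HigherLevelPairs
-- ===== SOURCE B (Python) =====
-- def RemoveGenePairsFromHigherLevel(HigherLevelPairs, LowerLevelPairs):
--     # Single pass: hash the lower-level pairs as frozensets once, then filter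
--     # the higher-level list in place (same in-place mutation as the original).
--     lower_sets = {frozenset(pair) for pair in LowerLevelPairs}
--     kept = [pair for pair in HigherLevelPairs if frozenset(pair) not in lower_sets]
--     HigherLevelPairs[:] = kept
--     return HigherLevelPairs
-- ===== Notes on version B (the rewrite author's own statement) =====
-- stated objective: faster
-- what changed: B replaces A's nested scan plus repeated list.remove with one set of frozensets built from the lower-level pairs and a single filtering pass over the higher-level list.
import Mathlib
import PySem

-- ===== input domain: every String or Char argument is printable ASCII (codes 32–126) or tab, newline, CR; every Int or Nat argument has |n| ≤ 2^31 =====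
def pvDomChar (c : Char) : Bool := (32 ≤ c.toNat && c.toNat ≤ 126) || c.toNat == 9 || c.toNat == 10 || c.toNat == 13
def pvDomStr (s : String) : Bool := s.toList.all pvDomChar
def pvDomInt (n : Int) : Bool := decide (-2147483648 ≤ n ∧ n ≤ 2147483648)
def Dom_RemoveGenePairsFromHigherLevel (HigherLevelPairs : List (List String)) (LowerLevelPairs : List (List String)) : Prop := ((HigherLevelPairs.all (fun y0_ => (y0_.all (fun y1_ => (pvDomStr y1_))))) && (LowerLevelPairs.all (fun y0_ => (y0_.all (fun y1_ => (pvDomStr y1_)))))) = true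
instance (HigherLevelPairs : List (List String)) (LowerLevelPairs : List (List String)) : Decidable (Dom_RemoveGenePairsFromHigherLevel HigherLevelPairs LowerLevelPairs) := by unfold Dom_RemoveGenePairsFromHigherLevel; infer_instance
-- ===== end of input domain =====

-- B builds a set of the lower-level pairs (as unordered sets) once and filters the higher list
-- in one pass, instead of A's nested scan followed by repeated list.remove (objective: faster).
-- A mutates HigherLevelPairs in place; B performs the same in-place replacement, and the
-- equivalence proved here is about the returned value.

-- ===== PORT A =====
-- exact port of Python's `set(x) == set(y)` on lists of strings (equal as finite sets)
def pySetEq (a b : List String) : Bool :=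
  a.all (fun x => b.contains x) && b.all (fun x => a.contains x)

-- `HigherLevelPairs.remove(pair)`: ValueError (none) is excluded by Pre_
def pyRemoveStep (cur : List (List String)) (pair : List String) : List (List String) :=
  (PySem.List.remove? cur pair).getD cur

def RemoveGenePairsFromHigherLevel (HigherLevelPairs : List (List String)) (LowerLevelPairs : List (List String)) : List (List String) :=
  -- for i in range(len(LowerLevelPairs)): for j in range(len(HigherLevelPairs)): …
  let to_remove : List (List String) :=
    LowerLevelPairs.foldl (fun acc li =>
      HigherLevelPairs.foldl (fun acc hj =>
        if pySetEq li hj then acc ++ [hj] else acc) acc) []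
  -- for pair in to_remove: HigherLevelPairs.remove(pair)
  to_remove.foldl pyRemoveStep HigherLevelPairs

-- ===== PORT B =====
def RemoveGenePairsFromHigherLevel_alt (HigherLevelPairs : List (List String)) (LowerLevelPairs : List (List String)) : List (List String) :=
  -- kept = [pair for pair in HigherLevelPairs if frozenset(pair) not in lower_sets]
  HigherLevelPairs.filter (fun pair => !(LowerLevelPairs.any (fun l => pySetEq l pair)))

-- ===== PRECONDITION & SPEC =====
-- Pre_ excludes exactly the inputs where A raises ValueError: some higher-level pair is
-- set-equal to two or more lower-level pairs, so A's second loop removes it more times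
-- than it occurs.
def Pre_RemoveGenePairsFromHigherLevel (HigherLevelPairs : List (List String)) (LowerLevelPairs : List (List String)) : Prop :=
  ∀ h ∈ HigherLevelPairs, LowerLevelPairs.countP (fun l => pySetEq l h) ≤ 1
instance (HigherLevelPairs : List (List String)) (LowerLevelPairs : List (List String)) : Decidable (Pre_RemoveGenePairsFromHigherLevel HigherLevelPairs LowerLevelPairs) := by unfold Pre_RemoveGenePairsFromHigherLevel; infer_instance

def pvWitness_RemoveGenePairsFromHigherLevel : List (List String) × List (List String) :=
  ([["a", "b"], ["c", "d"]], [["b", "a"]])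

def Spec_RemoveGenePairsFromHigherLevel (HigherLevelPairs : List (List String)) (LowerLevelPairs : List (List String)) (out : List (List String)) : Prop := out = RemoveGenePairsFromHigherLevel_alt HigherLevelPairs LowerLevelPairs
instance (HigherLevelPairs : List (List String)) (LowerLevelPairs : List (List String)) (out : List (List String)) : Decidable (Spec_RemoveGenePairsFromHigherLevel HigherLevelPairs LowerLevelPairs out) := by unfold Spec_RemoveGenePairsFromHigherLevel; infer_instance

-- ===== CLAIM (what is proved, stated in full; the proofs are below) =====
def Claim_equal_RemoveGenePairsFromHigherLevel : Prop := ∀ (HigherLevelPairs : List (List String)) (LowerLevelPairs : List (List String)), Dom_RemoveGenePairsFromHigherLevel HigherLevelPairs LowerLevelPairs → Pre_RemoveGenePairsFromHigherLevel HigherLevelPairs LowerLevelPairs → Spec_RemoveGenePairsFromHigherLevel HigherLevelPairs LowerLevelPairs (RemoveGenePairsFromHigherLevel HigherLevelPairs LowerLevelPairs)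


-- ===== LEMMAS AND PROOFS =====

-- removing a value ≠ the head leaves the head in place
lemma pyRemoveStep_cons_ne (x v : List String) (cur : List (List String)) (h : v ≠ x) :
    pyRemoveStep (x :: cur) v = x :: pyRemoveStep cur v := by
  have hxv : x ≠ v := fun e => h e.symm
  simp only [pyRemoveStep, PySem.List.remove?, List.idxOf?, List.findIdx?_cons]
  cases hfind : List.findIdx? (fun a => a == v) cur with
  | none => simp [hxv]
  | some k => simp [hxv, List.eraseIdx]

lemma pyRemoveStep_cons_self (x : List String) (cur : List (List String)) :
    pyRemoveStep (x :: cur) x = cur := by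
  simp [pyRemoveStep, PySem.List.remove?, List.idxOf?, List.findIdx?_cons, List.eraseIdx]

-- folding removals of values none of which equals x keeps x in front
lemma foldl_remove_cons_ne (l : List (List String)) (x : List String)
    (cur : List (List String)) (h : ∀ v ∈ l, v ≠ x) :
    l.foldl pyRemoveStep (x :: cur) = x :: l.foldl pyRemoveStep cur := by
  induction l generalizing cur with
  | nil => rfl
  | cons v vs ih =>
      rw [List.foldl_cons, List.foldl_cons,
          pyRemoveStep_cons_ne x v cur (h v (by simp))]
      exact ih _ (fun w hw => h w (by simp [hw]))

-- removing, one by one, exactly the p-satisfying elements of cur removes all of them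
lemma foldl_remove_filter (cur : List (List String)) (p : List String → Bool) :
    (cur.filter p).foldl pyRemoveStep cur = cur.filter (fun x => !p x) := by
  induction cur with
  | nil => rfl
  | cons x xs ih =>
      by_cases hp : p x
      · rw [List.filter_cons_of_pos hp, List.foldl_cons, pyRemoveStep_cons_self, ih,
            List.filter_cons_of_neg (by simp [hp])]
      · rw [List.filter_cons_of_neg hp,
            foldl_remove_cons_ne _ x xs (by
              intro v hv hvx
              exact hp (by simpa [hvx] using (List.of_mem_filter hv))),
            ih, List.filter_cons_of_pos (by simp [hp])]

-- the whole removal phase, grouped by lower-level pair, equals the one-pass filter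
lemma removal_phase_eq (L H : List (List String))
    (hpre : ∀ h ∈ H, L.countP (fun l => pySetEq l h) ≤ 1) :
    (L.flatMap (fun l => H.filter (fun h => pySetEq l h))).foldl pyRemoveStep H
      = H.filter (fun h => !(L.any (fun l => pySetEq l h))) := by
  induction L generalizing H with
  | nil => simp
  | cons l L' ih =>
      rw [List.flatMap_cons, List.foldl_append, foldl_remove_filter]
      have hdisj : ∀ l' ∈ L', ∀ h ∈ H, pySetEq l' h → ¬ pySetEq l h := by
        intro l' hl' h hh hl'h hlh
        have hcount := hpre h hh
        have h1 : 0 < L'.countP (fun l₀ => pySetEq l₀ h) :=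
          List.countP_pos_iff.mpr ⟨l', hl', hl'h⟩
        rw [List.countP_cons] at hcount
        have hone : (if pySetEq l h then 1 else 0) = 1 := by simp [hlh]
        rw [hone] at hcount
        omega
      have hfilters : ∀ l' ∈ L',
          H.filter (fun h => pySetEq l' h)
            = (H.filter (fun h => !pySetEq l h)).filter (fun h => pySetEq l' h) := by
        intro l' hl'
        rw [List.filter_filter]
        apply List.filter_congr
        intro h hh
        by_cases hm : pySetEq l' h
        · simp [hm, hdisj l' hl' h hh hm]
        · simp [hm]
      rw [List.flatMap_congr hfilters,
          ih (H.filter (fun h => !pySetEq l h)) (by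
            intro h hh
            have hhH : h ∈ H := List.mem_of_mem_filter hh
            have hcount := hpre h hhH
            rw [List.countP_cons] at hcount
            exact le_trans (Nat.le_add_right _ _) hcount),
          List.filter_filter]
      apply List.filter_congr
      intro h _
      by_cases hm : pySetEq l h <;> simp [hm]

-- A's accumulation phase produces exactly the grouped list of matched higher pairs
lemma to_remove_eq (L H : List (List String)) :
    L.foldl (fun acc li =>
      H.foldl (fun acc hj => if pySetEq li hj then acc ++ [hj] else acc) acc) []
      = L.flatMap (fun l => H.filter (fun h => pySetEq l h)) := by
  suffices hgen : ∀ (L : List (List String)) (acc : List (List String)),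
      L.foldl (fun acc li =>
        H.foldl (fun acc hj => if pySetEq li hj then acc ++ [hj] else acc) acc) acc
        = acc ++ L.flatMap (fun l => H.filter (fun h => pySetEq l h)) by
    simpa using hgen L []
  intro L
  induction L with
  | nil => simp
  | cons l L' ih =>
      intro acc
      have hinner := PySem.List.foldl_append_if (fun hj => pySetEq l hj) id H acc
      simp only [id_eq, List.map_id] at hinner
      rw [List.foldl_cons, hinner, ih, List.flatMap_cons, List.append_assoc]

-- ===== VERDICT (by name: the statement is the Claim_ definition above) =====
theorem RemoveGenePairsFromHigherLevel_spec : Claim_equal_RemoveGenePairsFromHigherLevel := by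
  intro H L _ hpre
  show RemoveGenePairsFromHigherLevel H L = RemoveGenePairsFromHigherLevel_alt H L
  unfold RemoveGenePairsFromHigherLevel RemoveGenePairsFromHigherLevel_alt
  rw [to_remove_eq L H, removal_phase_eq L H hpre]
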